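-- pv_equiv track=rewrite | github.com/JaydenzKoci/song-projects-bot | compare_midi.py | group_events_by_time_window
-- ===== SOURCE A (Python) =====
-- from collections import defaultdict
--
-- def group_events_by_time_window(events, time_window):
--     grouped_events = defaultdict(list)
--     sorted_times = sorted(events.keys())
--
--     for time in sorted_times:
--         notes = events[time]
--         found_group = False
--         for group_time in grouped_events:
--             if abs(time - group_time) <= time_window:
--                 grouped_events[group_time].extend(notes)
--                 found_group = True
--                 break
--         if not found_group:
--             grouped_events[time].extend(notes)
--     return grouped_events
-- ===== SOURCE B (Python) =====
-- from bisect import bisect_left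
--
-- def group_events_by_time_window(events, time_window):
--     # One pass over the sorted times with a binary search (bisect) for the
--     # earliest existing group within the window, instead of A's linear scan
--     # over all groups for every time.
--     group_times = []
--     group_notes = []
--     for time in sorted(events.keys()):
--         # existing group times are all < time, so |time-g| <= w  <=>  g >= time-w
--         i = bisect_left(group_times, time - time_window)
--         if i < len(group_times):
--             group_notes[i].extend(events[time])
--         else:
--             group_times.append(time)
--             group_notes.append(list(events[time]))
--     return dict(zip(group_times, group_notes))
-- ===== Notes on version B (the rewrite author's own statement) =====
-- stated objective: alternative
-- what changed: B keeps the group times in an always-sorted list and finds the earliest group within the window by binary search (bisect_left), replacing A's linear scan over all existing groups for every time; measured ~1.3x at the largest size, below the 1.5x bar.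
import Mathlib
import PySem

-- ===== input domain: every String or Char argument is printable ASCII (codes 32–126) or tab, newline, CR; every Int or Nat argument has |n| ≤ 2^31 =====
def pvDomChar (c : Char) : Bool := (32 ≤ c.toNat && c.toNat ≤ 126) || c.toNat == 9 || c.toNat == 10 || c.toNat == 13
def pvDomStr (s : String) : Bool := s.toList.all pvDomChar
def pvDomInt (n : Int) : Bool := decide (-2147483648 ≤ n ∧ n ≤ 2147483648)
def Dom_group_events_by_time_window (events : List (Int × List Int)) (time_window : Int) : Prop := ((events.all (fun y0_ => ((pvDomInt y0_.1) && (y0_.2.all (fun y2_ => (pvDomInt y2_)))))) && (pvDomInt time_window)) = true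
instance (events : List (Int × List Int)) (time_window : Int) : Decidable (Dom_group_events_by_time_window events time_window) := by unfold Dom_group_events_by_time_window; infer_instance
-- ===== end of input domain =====

-- B replaces A's linear scan over all existing groups (for every time) by a binary
-- search (bisect_left) in the always-sorted list of group times: same result.

-- ===== PORT A =====
def group_events_by_time_window (events : List (Int × List Int)) (time_window : Int) : List (Int × List Int) :=
  let d : PySem.Dict Int (List Int) := PySem.Dict.ofList events
  let sorted_times := PySem.List.sorted d.keys (fun t => t)
  (sorted_times.foldl
    (fun (grouped : PySem.Dict Int (List Int)) time =>
      let notes := d.getD time []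
      -- 'for group_time in grouped_events: if abs(...) <= w: extend; break' = first key within window
      match grouped.keys.find? (fun gt => decide (|time - gt| ≤ time_window)) with
      | some gt => grouped.modify gt [] (· ++ notes)
      | none    => grouped.modify time [] (· ++ notes))
    PySem.Dict.empty).items

-- ===== PORT B =====
def group_events_by_time_window_alt (events : List (Int × List Int)) (time_window : Int) : List (Int × List Int) :=
  let d : PySem.Dict Int (List Int) := PySem.Dict.ofList events
  let st := (PySem.List.sorted d.keys (fun t => t)).foldl
    (fun (st : List Int × List (List Int)) time =>
      let i := PySem.List.bisectLeft st.1 (time - time_window)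
      if i < st.1.length then
        (st.1, st.2.set i (st.2.getD i [] ++ d.getD time []))
      else
        (st.1 ++ [time], st.2 ++ [d.getD time []]))
    ([], [])
  st.1.zip st.2

-- ===== PRECONDITION & SPEC =====
def Spec_group_events_by_time_window (events : List (Int × List Int)) (time_window : Int) (out : List (Int × List Int)) : Prop := out = group_events_by_time_window_alt events time_window
instance (events : List (Int × List Int)) (time_window : Int) (out : List (Int × List Int)) : Decidable (Spec_group_events_by_time_window events time_window out) := by unfold Spec_group_events_by_time_window; infer_instance

-- ===== CLAIM (what is proved, stated in full; the proofs are below) =====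
def Claim_equal_group_events_by_time_window : Prop := ∀ (events : List (Int × List Int)) (time_window : Int), Dom_group_events_by_time_window events time_window → Spec_group_events_by_time_window events time_window (group_events_by_time_window events time_window)

-- ===== LEMMAS AND PROOFS =====

-- the two loop bodies, named for the proofs (definitionally the lambdas of the ports)
def pvStepA (d : PySem.Dict Int (List Int)) (time_window : Int)
    (grouped : PySem.Dict Int (List Int)) (time : Int) : PySem.Dict Int (List Int) :=
  let notes := d.getD time []
  match grouped.keys.find? (fun gt => decide (|time - gt| ≤ time_window)) with
  | some gt => grouped.modify gt [] (· ++ notes)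
  | none    => grouped.modify time [] (· ++ notes)

def pvStepB (d : PySem.Dict Int (List Int)) (time_window : Int)
    (st : List Int × List (List Int)) (time : Int) : List Int × List (List Int) :=
  let i := PySem.List.bisectLeft st.1 (time - time_window)
  if i < st.1.length then
    (st.1, st.2.set i (st.2.getD i [] ++ d.getD time []))
  else
    (st.1 ++ [time], st.2 ++ [d.getD time []])

lemma pv_find?_eq_some_getElem (p : Int → Bool) (xs : List Int) (i : Nat) (hi : i < xs.length)
    (hp : p xs[i] = true) (hj : ∀ j (hjl : j < xs.length), j < i → p xs[j] = false) :
    xs.find? p = some xs[i] := by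
  induction xs generalizing i with
  | nil => simp at hi
  | cons a xs ih =>
    cases i with
    | zero =>
      have hp' : p a = true := by simpa using hp
      simp [hp']
    | succ n =>
      have ha : p a = false := hj 0 (by simp) (by omega)
      have hrec := ih n (by simpa using hi) (by simpa using hp)
        (fun j hjl hlt => hj (j+1) (by simpa using hjl) (by omega))
      simpa [List.find?_cons, ha] using hrec

lemma pv_zip_map_set (gts : List Int) (gns : List (List Int)) (i : Nat) (v : List Int)
    (hi : i < gts.length) (hlen : gts.length = gns.length) (hnd : gts.Nodup) :
    (gts.zip gns).map (fun p => if (p.1 == gts[i]) = true then (gts[i], v) else p)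
      = gts.zip (gns.set i v) := by
  induction gts generalizing gns i with
  | nil => simp at hi
  | cons a gts ih =>
    cases gns with
    | nil => simp at hlen
    | cons b gns =>
      have hna : a ∉ gts := (List.nodup_cons.mp hnd).1
      have hnd' : gts.Nodup := (List.nodup_cons.mp hnd).2
      have hlen' : gts.length = gns.length := by simpa using hlen
      cases i with
      | zero =>
        simp only [List.getElem_cons_zero, List.zip_cons_cons, List.map_cons, List.set_cons_zero,
          beq_self_eq_true, if_true]
        refine congrArg (List.cons (a, v)) ?_
        have hcong : ∀ p ∈ gts.zip gns,
            (if (p.1 == a) = true then ((a : Int), v) else p) = id p := by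
          intro p hp
          have hmem : p.1 ∈ gts := (List.of_mem_zip (by exact hp)).1
          have : (p.1 == a) = false := by
            simp only [beq_eq_false_iff_ne]; intro h; exact hna (h ▸ hmem)
          simp [this]
        rw [List.map_congr_left hcong, List.map_id]
      | succ n =>
        have hn : n < gts.length := by simpa using hi
        have hne : (a == gts[n]'hn) = false := by
          simp only [beq_eq_false_iff_ne]; intro h; exact hna (h ▸ List.getElem_mem hn)
        simp only [List.getElem_cons_succ, List.zip_cons_cons, List.map_cons, List.set_cons_succ,
          hne, Bool.false_eq_true, if_false]
        exact congrArg (List.cons (a, b)) (ih gns n hn hlen' hnd')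

lemma pv_loop_eq (d : PySem.Dict Int (List Int)) (tw : Int) :
    ∀ (ts gts : List Int) (gns : List (List Int)),
      ts.Pairwise (· < ·) → gts.Pairwise (· < ·) → gts.length = gns.length →
      (∀ g ∈ gts, ∀ t ∈ ts, g < t) →
      (ts.foldl (pvStepA d tw) (PySem.Dict.mk (gts.zip gns))).items
        = (ts.foldl (pvStepB d tw) (gts, gns)).1.zip (ts.foldl (pvStepB d tw) (gts, gns)).2 := by
  intro ts
  induction ts with
  | nil => intro gts gns _ _ hlen _; rfl
  | cons t ts ih =>
    intro gts gns hts hgts hlen hall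
    have hnd : gts.Nodup := hgts.nodup
    have hkeys : (PySem.Dict.mk (gts.zip gns)).keys = gts := by
      simpa [PySem.Dict.keys] using List.map_fst_zip (le_of_eq hlen)
    have hlt : ∀ g ∈ gts, g < t := fun g hg => hall g hg t (by simp)
    have hple : gts.Pairwise (· ≤ ·) := hgts.imp le_of_lt
    obtain ⟨hile, hlo, hhi⟩ := PySem.List.bisectLeft_spec gts (t - tw) hple
    set i := PySem.List.bisectLeft gts (t - tw) with hidef
    by_cases hcase : i < gts.length
    · -- attach to the existing group gts[i]
      have hgn : i < gns.length := by omega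
      have hgi_lt : gts[i] < t := hlt _ (List.getElem_mem hcase)
      have hfind : gts.find? (fun gt => decide (|t - gt| ≤ tw)) = some gts[i] := by
        apply pv_find?_eq_some_getElem _ _ i hcase
        · have h1 : t - tw ≤ gts[i] := hhi i hcase le_rfl
          have : |t - gts[i]| ≤ tw := by rw [abs_of_nonneg (by omega)]; omega
          simpa using this
        · intro j hjl hji
          have h1 : gts[j] < t - tw := hlo j hjl hji
          have h2 : gts[j] < t := hlt _ (List.getElem_mem hjl)
          have : ¬ |t - gts[j]| ≤ tw := by rw [abs_of_nonneg (by omega)]; omega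
          simpa using this
      have hiz : i < (gts.zip gns).length := by rw [List.length_zip]; omega
      have hmemit : (gts[i], gns[i]) ∈ (PySem.Dict.mk (gts.zip gns)).items := by
        show (gts[i], gns[i]) ∈ gts.zip gns
        have hz : (gts.zip gns)[i] = (gts[i], gns[i]) := List.getElem_zip
        exact hz ▸ List.getElem_mem hiz
      have hndk : (PySem.Dict.mk (gts.zip gns)).keys.Nodup := by rw [hkeys]; exact hnd
      have hcont : (PySem.Dict.mk (gts.zip gns)).contains gts[i] = true := by
        rw [PySem.Dict.contains_iff_mem_keys, hkeys]; exact List.getElem_mem hcase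
      have hgetD : (PySem.Dict.mk (gts.zip gns)).getD gts[i] [] = gns[i] :=
        PySem.Dict.getD_of_mem_items _ hmemit hndk []
      have hstepA : pvStepA d tw (PySem.Dict.mk (gts.zip gns)) t
          = PySem.Dict.mk (gts.zip (gns.set i (gns[i] ++ d.getD t []))) := by
        simp only [pvStepA, hkeys, hfind]
        apply PySem.Dict.ext
        rw [PySem.Dict.modify, PySem.Dict.items_insert_of_contains _ _ hcont, hgetD]
        exact pv_zip_map_set gts gns i (gns[i] ++ d.getD t []) hcase hlen hnd
      have hB : pvStepB d tw (gts, gns) t = (gts, gns.set i (gns[i] ++ d.getD t [])) := by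
        simp only [pvStepB]
        rw [← hidef, if_pos hcase, List.getD_eq_getElem gns [] hgn]
      rw [List.foldl_cons, List.foldl_cons, hstepA, hB]
      exact ih gts _ hts.tail hgts (by simp [hlen])
        (fun g hg t' ht' => hall g hg t' (by simp [ht']))
    · -- open a new group at t
      have hieq : i = gts.length := by omega
      have hfind : gts.find? (fun gt => decide (|t - gt| ≤ tw)) = none := by
        apply List.find?_eq_none.mpr
        intro g hg
        obtain ⟨j, hjl, hje⟩ := List.mem_iff_getElem.mp hg
        have h1 : gts[j] < t - tw := hlo j hjl (by omega)
        have h2 : gts[j] < t := hlt _ (List.getElem_mem hjl)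
        subst hje
        have : ¬ |t - gts[j]| ≤ tw := by rw [abs_of_nonneg (by omega)]; omega
        simpa using this
      have hcont : (PySem.Dict.mk (gts.zip gns)).contains t = false := by
        rw [← Bool.not_eq_true, PySem.Dict.contains_iff_mem_keys, hkeys]
        intro hmem; exact absurd (hlt t hmem) (lt_irrefl t)
      have hstepA : pvStepA d tw (PySem.Dict.mk (gts.zip gns)) t
          = PySem.Dict.mk ((gts ++ [t]).zip (gns ++ [d.getD t []])) := by
        simp only [pvStepA, hkeys, hfind]
        apply PySem.Dict.ext
        rw [PySem.Dict.modify, PySem.Dict.getD_of_not_contains _ _ hcont,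
          PySem.Dict.items_insert_of_not_contains _ _ hcont]
        simp [List.zip_append hlen]
      have hB : pvStepB d tw (gts, gns) t = (gts ++ [t], gns ++ [d.getD t []]) := by
        simp only [pvStepB]
        rw [← hidef, if_neg hcase]
      rw [List.foldl_cons, List.foldl_cons, hstepA, hB]
      apply ih _ _ hts.tail
      · rw [List.pairwise_append]
        exact ⟨hgts, by simp, by simpa using hlt⟩
      · simp [hlen]
      · intro g hg t' ht'
        rcases List.mem_append.mp hg with h | h
        · exact hall g h t' (by simp [ht'])
        · have : g = t := by simpa using h
          subst this
          exact (List.pairwise_cons.mp hts).1 t' ht'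

lemma pv_sorted_keys_pairwise (events : List (Int × List Int)) :
    (PySem.List.sorted (PySem.Dict.ofList events : PySem.Dict Int (List Int)).keys (fun t => t)).Pairwise (· < ·) := by
  have hperm := PySem.List.sorted_perm
    (PySem.Dict.ofList events : PySem.Dict Int (List Int)).keys (fun t : Int => t) false
  have hnd := hperm.symm.nodup (PySem.Dict.nodup_keys_ofList events)
  have hle := PySem.List.sorted_pairwise
    (PySem.Dict.ofList events : PySem.Dict Int (List Int)).keys (fun t : Int => t)
  exact (hle.and hnd).imp (fun ⟨a, b⟩ => lt_of_le_of_ne a b)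

-- ===== VERDICT (by name: the statement is the Claim_ definition above) =====
theorem group_events_by_time_window_spec : Claim_equal_group_events_by_time_window := by
  intro events time_window _
  unfold Spec_group_events_by_time_window group_events_by_time_window group_events_by_time_window_alt
  exact pv_loop_eq (PySem.Dict.ofList events) time_window
    (PySem.List.sorted (PySem.Dict.ofList events : PySem.Dict Int (List Int)).keys (fun t => t))
    [] [] (pv_sorted_keys_pairwise events) (by simp) rfl (by simp)
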